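-- pv_equiv track=rewrite | github.com/DeeJ4yNg/MyAgent | tools/code_analyzer_tool.py | _generate_python_suggestions
-- ===== SOURCE A (Python) =====
-- from typing import Dict, List, Optional, Any
--
-- def _generate_python_suggestions(issues: List[Dict[str, Any]]) -> List[str]:
--     """Generate suggestions based on found issues."""
--     suggestions = []
--
--     # Group issues by type
--     issue_types = {}
--     for issue in issues:
--         issue_type = issue['type']
--         if issue_type not in issue_types:
--             issue_types[issue_type] = []
--         issue_types[issue_type].append(issue)
--
--     # Generate suggestions for each issue type
--     if 'Style' in issue_types:
--         suggestions.append("Consider using a code formatter like Black to maintain consistent style.")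
--         suggestions.append("Set up a linter like Flake8 or Pylint to catch style issues automatically.")
--
--     if 'Security' in issue_types:
--         suggestions.append("Review the use of dangerous functions and consider safer alternatives.")
--         suggestions.append("Implement proper input validation and sanitization.")
--
--     if 'Performance' in issue_types:
--         suggestions.append("Consider using more Pythonic constructs for better performance.")
--         suggestions.append("Profile your code to identify and optimize bottlenecks.")
--
--     return suggestions
-- ===== SOURCE B (Python) =====
-- def _generate_python_suggestions(issues):
--     """Generate suggestions based on found issues."""
--     table = [
--         ('Style', ["Consider using a code formatter like Black to maintain consistent style.",
--                    "Set up a linter like Flake8 or Pylint to catch style issues automatically."]),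
--         ('Security', ["Review the use of dangerous functions and consider safer alternatives.",
--                       "Implement proper input validation and sanitization."]),
--         ('Performance', ["Consider using more Pythonic constructs for better performance.",
--                          "Profile your code to identify and optimize bottlenecks."]),
--     ]
--
--     def emit(entries):
--         # recursion over the table; each entry scans issues directly, no index is built
--         if not entries:
--             return []
--         issue_type, msgs = entries[0]
--         rest = emit(entries[1:])
--         if any(issue['type'] == issue_type for issue in issues):
--             return msgs + rest
--         return rest
--
--     return emit(table)
-- ===== Notes on version B (the rewrite author's own statement) =====
-- stated objective: alternative
-- what changed: Drops A's grouping dict entirely: B recurses over a (type, suggestions) table and for each entry does a direct any() scan of the issues, assembling the result by recursive concatenation instead of appending to an accumulator.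
import Mathlib
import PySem

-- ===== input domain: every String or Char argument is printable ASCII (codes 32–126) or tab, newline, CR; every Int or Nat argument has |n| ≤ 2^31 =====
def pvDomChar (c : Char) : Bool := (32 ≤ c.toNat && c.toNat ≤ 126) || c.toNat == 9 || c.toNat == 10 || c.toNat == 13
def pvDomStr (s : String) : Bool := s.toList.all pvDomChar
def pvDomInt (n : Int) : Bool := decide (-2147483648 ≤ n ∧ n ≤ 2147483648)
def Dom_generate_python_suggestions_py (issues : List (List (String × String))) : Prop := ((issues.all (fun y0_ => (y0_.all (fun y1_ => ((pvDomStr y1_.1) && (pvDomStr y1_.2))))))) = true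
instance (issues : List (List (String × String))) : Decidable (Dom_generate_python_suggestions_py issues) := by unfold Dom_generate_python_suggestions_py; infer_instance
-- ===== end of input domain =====

-- ===== PORT A =====
-- One honest line: B drops A's grouping dict and three if-blocks, recursing over a
-- (type, suggestions) table with a direct scan of the issues per entry (objective: alternative).

-- issue['type'] (first-match association-list lookup; Pre_ guarantees the key is present)
def pvTypeOf (issue : List (String × String)) : String :=
  ((PySem.Dict.mk issue).get? "type").getD ""

def generate_python_suggestions_py (issues : List (List (String × String))) : List String :=
  -- Group issues by type
  let issue_types : PySem.Dict String (List (List (String × String))) :=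
    issues.foldl (fun d issue =>
      let issue_type := pvTypeOf issue
      let d := if d.contains issue_type then d else d.insert issue_type []
      d.modify issue_type [] (fun l => l ++ [issue])) PySem.Dict.empty
  -- Generate suggestions for each issue type
  let suggestions : List String := []
  let suggestions := if issue_types.contains "Style" then
      suggestions ++ ["Consider using a code formatter like Black to maintain consistent style."]
                  ++ ["Set up a linter like Flake8 or Pylint to catch style issues automatically."]
    else suggestions
  let suggestions := if issue_types.contains "Security" then
      suggestions ++ ["Review the use of dangerous functions and consider safer alternatives."]
                  ++ ["Implement proper input validation and sanitization."]
    else suggestions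
  let suggestions := if issue_types.contains "Performance" then
      suggestions ++ ["Consider using more Pythonic constructs for better performance."]
                  ++ ["Profile your code to identify and optimize bottlenecks."]
    else suggestions
  suggestions

-- ===== PORT B =====
def pvTable : List (String × List String) :=
  [("Style", ["Consider using a code formatter like Black to maintain consistent style.",
              "Set up a linter like Flake8 or Pylint to catch style issues automatically."]),
   ("Security", ["Review the use of dangerous functions and consider safer alternatives.",
                 "Implement proper input validation and sanitization."]),
   ("Performance", ["Consider using more Pythonic constructs for better performance.",
                    "Profile your code to identify and optimize bottlenecks."])]

-- recursion over the table; each entry scans issues directly, no index is built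
def pvEmit (issues : List (List (String × String))) : List (String × List String) → List String
  | [] => []
  | entry :: rest =>
    let r := pvEmit issues rest
    if issues.any (fun issue => pvTypeOf issue == entry.1) then entry.2 ++ r else r

def generate_python_suggestions_py_alt (issues : List (List (String × String))) : List String :=
  pvEmit issues pvTable

-- ===== PRECONDITION & SPEC =====
-- Pre_ excludes issues lacking a 'type' key, on which A raises KeyError (B raises there too).
def Pre_generate_python_suggestions_py (issues : List (List (String × String))) : Prop :=
  ∀ issue ∈ issues, "type" ∈ issue.map Prod.fst

instance (issues : List (List (String × String))) : Decidable (Pre_generate_python_suggestions_py issues) := by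
  unfold Pre_generate_python_suggestions_py; infer_instance

def pvWitness_generate_python_suggestions_py : (List (List (String × String))) :=
  [[("type", "Style")], [("type", "Other")]]

def Spec_generate_python_suggestions_py (issues : List (List (String × String))) (out : List String) : Prop := out = generate_python_suggestions_py_alt issues
instance (issues : List (List (String × String))) (out : List String) : Decidable (Spec_generate_python_suggestions_py issues out) := by unfold Spec_generate_python_suggestions_py; infer_instance

-- ===== CLAIM (what is proved, stated in full; the proofs are below) =====
def Claim_equal_generate_python_suggestions_py : Prop := ∀ (issues : List (List (String × String))), Dom_generate_python_suggestions_py issues → Pre_generate_python_suggestions_py issues → Spec_generate_python_suggestions_py issues (generate_python_suggestions_py issues)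

-- ===== LEMMAS AND PROOFS =====

-- A's grouping dict contains a key iff some issue has that type.
theorem contains_groupFold (issues : List (List (String × String)))
    (d : PySem.Dict String (List (List (String × String)))) (t : String) :
    ((issues.foldl (fun d issue =>
        let issue_type := pvTypeOf issue
        let d := if d.contains issue_type then d else d.insert issue_type []
        d.modify issue_type [] (fun l => l ++ [issue])) d).contains t = true)
      ↔ (d.contains t = true ∨ t ∈ issues.map pvTypeOf) := by
  induction issues generalizing d with
  | nil => simp
  | cons issue rest ih =>
    simp only [List.foldl_cons, List.map_cons, List.mem_cons]
    rw [ih]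
    by_cases hc : d.contains (pvTypeOf issue) = true
    · simp only [hc, if_true, PySem.Dict.contains_modify, Bool.or_eq_true, beq_iff_eq]
      tauto
    · simp only [hc, if_false, Bool.false_eq_true, PySem.Dict.contains_modify,
        PySem.Dict.contains_insert, Bool.or_eq_true, beq_iff_eq]
      tauto

-- B's direct scan finds a type iff some issue has that type.
theorem any_scan (issues : List (List (String × String))) (t : String) :
    (issues.any (fun issue => pvTypeOf issue == t) = true) ↔ t ∈ issues.map pvTypeOf := by
  rw [List.any_eq_true]
  simp only [beq_iff_eq, List.mem_map]

-- ===== VERDICT (by name: the statement is the Claim_ definition above) =====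
theorem generate_python_suggestions_py_spec : Claim_equal_generate_python_suggestions_py := by
  intro issues _ _
  unfold Spec_generate_python_suggestions_py
  unfold generate_python_suggestions_py generate_python_suggestions_py_alt pvTable
  simp only [pvEmit]
  have key : ∀ t : String,
      ((issues.foldl (fun d issue =>
          let issue_type := pvTypeOf issue
          let d := if d.contains issue_type then d else d.insert issue_type []
          d.modify issue_type [] (fun l => l ++ [issue])) PySem.Dict.empty).contains t)
        = issues.any (fun issue => pvTypeOf issue == t) := by
    intro t
    have h1 := contains_groupFold issues PySem.Dict.empty t
    simp only [PySem.Dict.contains_empty, Bool.false_eq_true, false_or] at h1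
    exact Bool.eq_iff_iff.mpr (h1.trans (any_scan issues t).symm)
  rw [key, key, key]
  split_ifs <;> simp
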